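-- pv_equiv track=rewrite | github.com/Kharim234/Tmag5170_spi_decoder | HighLevelAnalyzer.py | uintX_to_intX_represented_on_8_bits
-- ===== SOURCE A (Python) =====
-- def get_bit (value: int, i: int) -> int:
--     return (value >> i) & 0x01
--
-- def set_bit (bit_val: int, position: int) -> int:
--     return (bit_val << position)
--
-- def set_bit_in_value (bit_val: int, position: int, value: int) -> int:
--     return (set_bit(bit_val, position) | value)
--
-- def uintX_to_intX_represented_on_8_bits (in_value: int, size_of_in_value: int) -> int:
--     int_val = None
--     if size_of_in_value <= 8 and size_of_in_value>0:
--         value = in_value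
--         sign_bit = get_bit(in_value, size_of_in_value - 1)
--         for i in range((size_of_in_value),8):
--             value = set_bit_in_value(sign_bit, i, value)
--         byte_value = value.to_bytes(1, 'big')
--         int_val = int.from_bytes(byte_value, 'big', signed = True)
--     return (int_val)
-- ===== SOURCE B (Python) =====
-- def uintX_to_intX_represented_on_8_bits(in_value: int, size_of_in_value: int) -> int:
--     if not (0 < size_of_in_value <= 8):
--         return None
--     sign = (in_value >> (size_of_in_value - 1)) & 1
--     high_mask = 0xFF & ~((1 << size_of_in_value) - 1)
--     value = in_value | high_mask if sign else in_value
--     byte_value = value.to_bytes(1, 'big')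
--     return int.from_bytes(byte_value, 'big', signed=True)
-- ===== Notes on version B (the rewrite author's own statement) =====
-- stated objective: simpler
-- what changed: Replaces the per-bit loop (ORing the sign bit into positions size..7 one at a time) with a single closed-form high-bit mask computed once and ORed in when the sign bit is set, with an early return for the out-of-range size guard.
import Mathlib
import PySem

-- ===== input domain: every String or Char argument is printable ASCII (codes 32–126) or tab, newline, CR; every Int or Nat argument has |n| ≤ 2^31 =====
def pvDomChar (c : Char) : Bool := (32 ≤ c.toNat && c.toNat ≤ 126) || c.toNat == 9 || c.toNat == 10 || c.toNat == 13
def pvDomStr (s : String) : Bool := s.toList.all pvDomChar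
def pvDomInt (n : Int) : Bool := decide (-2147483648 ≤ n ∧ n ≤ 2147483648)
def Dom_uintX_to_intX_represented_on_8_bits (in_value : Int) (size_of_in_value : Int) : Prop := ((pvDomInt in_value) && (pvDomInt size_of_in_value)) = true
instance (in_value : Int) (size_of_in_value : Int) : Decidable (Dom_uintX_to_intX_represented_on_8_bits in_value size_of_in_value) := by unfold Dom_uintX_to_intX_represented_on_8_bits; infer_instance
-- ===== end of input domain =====

-- B replaces A's per-bit sign-extension loop with one closed-form high-bit mask; return value identical wherever A returns.

-- ===== PORT A =====
def pvGetBit (value : Int) (i : Nat) : Int := PySem.Int.band (value >>> i) 1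

def pvSetBit (bit_val : Int) (position : Nat) : Int := bit_val <<< position

def pvSetBitInValue (bit_val : Int) (position : Nat) (value : Int) : Int :=
  PySem.Int.bor (pvSetBit bit_val position) value

-- A, step for step. Inside the guard 0 < size ≤ 8 every shift amount is nonnegative, so
-- '.toNat' is exact there. 'value.to_bytes(1,"big")' followed by 'int.from_bytes(..., signed=True)'
-- is ported as the signed reinterpretation 'if value ≥ 128 then value - 256 else value',
-- exact when 0 ≤ value ≤ 255; to_bytes raises OverflowError otherwise, which Pre_ excludes.
def uintX_to_intX_represented_on_8_bits (in_value : Int) (size_of_in_value : Int) : Option Int :=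
  if size_of_in_value ≤ 8 ∧ size_of_in_value > 0 then
    let value := in_value
    let sign_bit := pvGetBit in_value (size_of_in_value - 1).toNat
    let value := (PySem.List.pyRange size_of_in_value 8 1).foldl
      (fun v i => pvSetBitInValue sign_bit i.toNat v) value
    some (if value ≥ 128 then value - 256 else value)
  else none

-- ===== PORT B =====
-- B, step for step (same to_bytes/from_bytes port as in A, exact under Pre_).
def uintX_to_intX_represented_on_8_bits_alt (in_value : Int) (size_of_in_value : Int) : Option Int :=
  if ¬ (0 < size_of_in_value ∧ size_of_in_value ≤ 8) then none
  else
    let sign := PySem.Int.band (in_value >>> (size_of_in_value - 1).toNat) 1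
    let high_mask := PySem.Int.band 0xFF (Int.not ((1 <<< size_of_in_value.toNat) - 1))
    let value := if sign ≠ 0 then PySem.Int.bor in_value high_mask else in_value
    some (if value ≥ 128 then value - 256 else value)

-- ===== PRECONDITION & SPEC =====
-- Pre_ excludes exactly the inputs where A raises OverflowError: when the size guard holds
-- but in_value is not a single unsigned byte, value.to_bytes(1,'big') raises.
def Pre_uintX_to_intX_represented_on_8_bits (in_value : Int) (size_of_in_value : Int) : Prop :=
  (0 < size_of_in_value ∧ size_of_in_value ≤ 8) → (0 ≤ in_value ∧ in_value ≤ 255)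
instance (in_value : Int) (size_of_in_value : Int) : Decidable (Pre_uintX_to_intX_represented_on_8_bits in_value size_of_in_value) := by unfold Pre_uintX_to_intX_represented_on_8_bits; infer_instance

def pvWitness_uintX_to_intX_represented_on_8_bits : Int × Int := (5, 4)

def Spec_uintX_to_intX_represented_on_8_bits (in_value : Int) (size_of_in_value : Int) (out : Option Int) : Prop := out = uintX_to_intX_represented_on_8_bits_alt in_value size_of_in_value
instance (in_value : Int) (size_of_in_value : Int) (out : Option Int) : Decidable (Spec_uintX_to_intX_represented_on_8_bits in_value size_of_in_value out) := by unfold Spec_uintX_to_intX_represented_on_8_bits; infer_instance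

-- ===== CLAIM (what is proved, stated in full; the proofs are below) =====
def Claim_equal_uintX_to_intX_represented_on_8_bits : Prop := ∀ (in_value : Int) (size_of_in_value : Int), Dom_uintX_to_intX_represented_on_8_bits in_value size_of_in_value → Pre_uintX_to_intX_represented_on_8_bits in_value size_of_in_value → Spec_uintX_to_intX_represented_on_8_bits in_value size_of_in_value (uintX_to_intX_represented_on_8_bits in_value size_of_in_value)

-- ===== LEMMAS AND PROOFS =====

lemma pv_zero_bor (a : Int) : PySem.Int.bor 0 a = a := by
  rw [PySem.Int.bor_comm]; exact PySem.Int.bor_zero a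

-- inside the guard both ports agree for every nonnegative in_value
lemma pv_key (n : Nat) (s : Int) (h1 : 0 < s) (h2 : s ≤ 8) :
    uintX_to_intX_represented_on_8_bits (n : Int) s
      = uintX_to_intX_represented_on_8_bits_alt (n : Int) s := by
  have hsb : ∀ k : Nat, PySem.Int.band ((n:Int) >>> k) 1 = ((n >>> k &&& 1 : Nat) : Int) := fun k => by
    rw [show ((n:Int) >>> k) = ((n >>> k : Nat) : Int) from rfl,
        show (1:Int) = ((1:Nat):Int) from rfl, PySem.Int.band_natCast]
  interval_cases s
  · -- size_of_in_value = 1 (the shift by 0 was simplified away, so the k = 0 case of hsb is inlined)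
    unfold uintX_to_intX_represented_on_8_bits uintX_to_intX_represented_on_8_bits_alt
    rw [show PySem.List.pyRange 1 8 1 = [1,2,3,4,5,6,7] from by decide]
    norm_num [List.foldl, pvSetBitInValue, pvSetBit, pvGetBit, Int.toNat]
    rw [show PySem.Int.band 255 (((1:Int) <<< (1:Nat)) - 1).not = 254 from by decide]
    rw [show PySem.Int.band ((n:Int)) 1 = ((n &&& 1 : Nat) : Int) from by
      rw [show ((n:Int)) = ((n:Nat):Int) from rfl, show (1:Int) = ((1:Nat):Int) from rfl,
        PySem.Int.band_natCast]]
    have hlt : n &&& 1 < 2 := by rw [Nat.and_one_is_mod]; exact Nat.mod_lt _ (by norm_num)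
    rcases (by omega : n &&& 1 = 0 ∨ n &&& 1 = 1) with h | h <;> rw [h]
    · simp [pv_zero_bor]
    · norm_num
      have hchain : PySem.Int.bor ((1:Int) <<< (7:Nat)) (PySem.Int.bor ((1:Int) <<< (6:Nat)) (PySem.Int.bor ((1:Int) <<< (5:Nat)) (PySem.Int.bor ((1:Int) <<< (4:Nat)) (PySem.Int.bor ((1:Int) <<< (3:Nat)) (PySem.Int.bor ((1:Int) <<< (2:Nat)) (PySem.Int.bor ((1:Int) <<< (1:Nat)) (↑n))))))) = PySem.Int.bor (↑n) 254 := by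
        rw [show ((1:Int) <<< (1:Nat)) = (((2:Nat)):Int) from by decide]
        rw [show ((1:Int) <<< (2:Nat)) = (((4:Nat)):Int) from by decide]
        rw [show ((1:Int) <<< (3:Nat)) = (((8:Nat)):Int) from by decide]
        rw [show ((1:Int) <<< (4:Nat)) = (((16:Nat)):Int) from by decide]
        rw [show ((1:Int) <<< (5:Nat)) = (((32:Nat)):Int) from by decide]
        rw [show ((1:Int) <<< (6:Nat)) = (((64:Nat)):Int) from by decide]
        rw [show ((1:Int) <<< (7:Nat)) = (((128:Nat)):Int) from by decide]
        rw [show ((254:Int)) = (((254:Nat)):Int) from by decide]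
        simp only [PySem.Int.bor_natCast, Nat.cast_inj]
        simp [Nat.lor_assoc, Nat.lor_comm]
      rw [hchain]
  · -- size_of_in_value = 2
    unfold uintX_to_intX_represented_on_8_bits uintX_to_intX_represented_on_8_bits_alt
    rw [show PySem.List.pyRange 2 8 1 = [2,3,4,5,6,7] from by decide]
    norm_num [List.foldl, pvSetBitInValue, pvSetBit, pvGetBit, Int.toNat]
    rw [show PySem.Int.band 255 (((1:Int) <<< (2:Nat)) - 1).not = 252 from by decide]
    rw [hsb]
    have hlt : n >>> 1 &&& 1 < 2 := by rw [Nat.and_one_is_mod]; exact Nat.mod_lt _ (by norm_num)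
    rcases (by omega : n >>> 1 &&& 1 = 0 ∨ n >>> 1 &&& 1 = 1) with h | h <;> rw [h]
    · simp [pv_zero_bor]
    · norm_num
      have hchain : PySem.Int.bor ((1:Int) <<< (7:Nat)) (PySem.Int.bor ((1:Int) <<< (6:Nat)) (PySem.Int.bor ((1:Int) <<< (5:Nat)) (PySem.Int.bor ((1:Int) <<< (4:Nat)) (PySem.Int.bor ((1:Int) <<< (3:Nat)) (PySem.Int.bor ((1:Int) <<< (2:Nat)) (↑n)))))) = PySem.Int.bor (↑n) 252 := by
        rw [show ((1:Int) <<< (2:Nat)) = (((4:Nat)):Int) from by decide]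
        rw [show ((1:Int) <<< (3:Nat)) = (((8:Nat)):Int) from by decide]
        rw [show ((1:Int) <<< (4:Nat)) = (((16:Nat)):Int) from by decide]
        rw [show ((1:Int) <<< (5:Nat)) = (((32:Nat)):Int) from by decide]
        rw [show ((1:Int) <<< (6:Nat)) = (((64:Nat)):Int) from by decide]
        rw [show ((1:Int) <<< (7:Nat)) = (((128:Nat)):Int) from by decide]
        rw [show ((252:Int)) = (((252:Nat)):Int) from by decide]
        simp only [PySem.Int.bor_natCast, Nat.cast_inj]
        simp [Nat.lor_assoc, Nat.lor_comm]
      rw [hchain]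
  · -- size_of_in_value = 3
    unfold uintX_to_intX_represented_on_8_bits uintX_to_intX_represented_on_8_bits_alt
    rw [show PySem.List.pyRange 3 8 1 = [3,4,5,6,7] from by decide]
    norm_num [List.foldl, pvSetBitInValue, pvSetBit, pvGetBit, Int.toNat]
    rw [show PySem.Int.band 255 (((1:Int) <<< (3:Nat)) - 1).not = 248 from by decide]
    rw [hsb]
    have hlt : n >>> 2 &&& 1 < 2 := by rw [Nat.and_one_is_mod]; exact Nat.mod_lt _ (by norm_num)
    rcases (by omega : n >>> 2 &&& 1 = 0 ∨ n >>> 2 &&& 1 = 1) with h | h <;> rw [h]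
    · simp [pv_zero_bor]
    · norm_num
      have hchain : PySem.Int.bor ((1:Int) <<< (7:Nat)) (PySem.Int.bor ((1:Int) <<< (6:Nat)) (PySem.Int.bor ((1:Int) <<< (5:Nat)) (PySem.Int.bor ((1:Int) <<< (4:Nat)) (PySem.Int.bor ((1:Int) <<< (3:Nat)) (↑n))))) = PySem.Int.bor (↑n) 248 := by
        rw [show ((1:Int) <<< (3:Nat)) = (((8:Nat)):Int) from by decide]
        rw [show ((1:Int) <<< (4:Nat)) = (((16:Nat)):Int) from by decide]
        rw [show ((1:Int) <<< (5:Nat)) = (((32:Nat)):Int) from by decide]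
        rw [show ((1:Int) <<< (6:Nat)) = (((64:Nat)):Int) from by decide]
        rw [show ((1:Int) <<< (7:Nat)) = (((128:Nat)):Int) from by decide]
        rw [show ((248:Int)) = (((248:Nat)):Int) from by decide]
        simp only [PySem.Int.bor_natCast, Nat.cast_inj]
        simp [Nat.lor_assoc, Nat.lor_comm]
      rw [hchain]
  · -- size_of_in_value = 4
    unfold uintX_to_intX_represented_on_8_bits uintX_to_intX_represented_on_8_bits_alt
    rw [show PySem.List.pyRange 4 8 1 = [4,5,6,7] from by decide]
    norm_num [List.foldl, pvSetBitInValue, pvSetBit, pvGetBit, Int.toNat]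
    rw [show PySem.Int.band 255 (((1:Int) <<< (4:Nat)) - 1).not = 240 from by decide]
    rw [hsb]
    have hlt : n >>> 3 &&& 1 < 2 := by rw [Nat.and_one_is_mod]; exact Nat.mod_lt _ (by norm_num)
    rcases (by omega : n >>> 3 &&& 1 = 0 ∨ n >>> 3 &&& 1 = 1) with h | h <;> rw [h]
    · simp [pv_zero_bor]
    · norm_num
      have hchain : PySem.Int.bor ((1:Int) <<< (7:Nat)) (PySem.Int.bor ((1:Int) <<< (6:Nat)) (PySem.Int.bor ((1:Int) <<< (5:Nat)) (PySem.Int.bor ((1:Int) <<< (4:Nat)) (↑n)))) = PySem.Int.bor (↑n) 240 := by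
        rw [show ((1:Int) <<< (4:Nat)) = (((16:Nat)):Int) from by decide]
        rw [show ((1:Int) <<< (5:Nat)) = (((32:Nat)):Int) from by decide]
        rw [show ((1:Int) <<< (6:Nat)) = (((64:Nat)):Int) from by decide]
        rw [show ((1:Int) <<< (7:Nat)) = (((128:Nat)):Int) from by decide]
        rw [show ((240:Int)) = (((240:Nat)):Int) from by decide]
        simp only [PySem.Int.bor_natCast, Nat.cast_inj]
        simp [Nat.lor_assoc, Nat.lor_comm]
      rw [hchain]
  · -- size_of_in_value = 5
    unfold uintX_to_intX_represented_on_8_bits uintX_to_intX_represented_on_8_bits_alt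
    rw [show PySem.List.pyRange 5 8 1 = [5,6,7] from by decide]
    norm_num [List.foldl, pvSetBitInValue, pvSetBit, pvGetBit, Int.toNat]
    rw [show PySem.Int.band 255 (((1:Int) <<< (5:Nat)) - 1).not = 224 from by decide]
    rw [hsb]
    have hlt : n >>> 4 &&& 1 < 2 := by rw [Nat.and_one_is_mod]; exact Nat.mod_lt _ (by norm_num)
    rcases (by omega : n >>> 4 &&& 1 = 0 ∨ n >>> 4 &&& 1 = 1) with h | h <;> rw [h]
    · simp [pv_zero_bor]
    · norm_num
      have hchain : PySem.Int.bor ((1:Int) <<< (7:Nat)) (PySem.Int.bor ((1:Int) <<< (6:Nat)) (PySem.Int.bor ((1:Int) <<< (5:Nat)) (↑n))) = PySem.Int.bor (↑n) 224 := by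
        rw [show ((1:Int) <<< (5:Nat)) = (((32:Nat)):Int) from by decide]
        rw [show ((1:Int) <<< (6:Nat)) = (((64:Nat)):Int) from by decide]
        rw [show ((1:Int) <<< (7:Nat)) = (((128:Nat)):Int) from by decide]
        rw [show ((224:Int)) = (((224:Nat)):Int) from by decide]
        simp only [PySem.Int.bor_natCast, Nat.cast_inj]
        simp [Nat.lor_assoc, Nat.lor_comm]
      rw [hchain]
  · -- size_of_in_value = 6
    unfold uintX_to_intX_represented_on_8_bits uintX_to_intX_represented_on_8_bits_alt
    rw [show PySem.List.pyRange 6 8 1 = [6,7] from by decide]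
    norm_num [List.foldl, pvSetBitInValue, pvSetBit, pvGetBit, Int.toNat]
    rw [show PySem.Int.band 255 (((1:Int) <<< (6:Nat)) - 1).not = 192 from by decide]
    rw [hsb]
    have hlt : n >>> 5 &&& 1 < 2 := by rw [Nat.and_one_is_mod]; exact Nat.mod_lt _ (by norm_num)
    rcases (by omega : n >>> 5 &&& 1 = 0 ∨ n >>> 5 &&& 1 = 1) with h | h <;> rw [h]
    · simp [pv_zero_bor]
    · norm_num
      have hchain : PySem.Int.bor ((1:Int) <<< (7:Nat)) (PySem.Int.bor ((1:Int) <<< (6:Nat)) (↑n)) = PySem.Int.bor (↑n) 192 := by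
        rw [show ((1:Int) <<< (6:Nat)) = (((64:Nat)):Int) from by decide]
        rw [show ((1:Int) <<< (7:Nat)) = (((128:Nat)):Int) from by decide]
        rw [show ((192:Int)) = (((192:Nat)):Int) from by decide]
        simp only [PySem.Int.bor_natCast, Nat.cast_inj]
        simp [Nat.lor_assoc, Nat.lor_comm]
      rw [hchain]
  · -- size_of_in_value = 7
    unfold uintX_to_intX_represented_on_8_bits uintX_to_intX_represented_on_8_bits_alt
    rw [show PySem.List.pyRange 7 8 1 = [7] from by decide]
    norm_num [List.foldl, pvSetBitInValue, pvSetBit, pvGetBit, Int.toNat]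
    rw [show PySem.Int.band 255 (((1:Int) <<< (7:Nat)) - 1).not = 128 from by decide]
    rw [hsb]
    have hlt : n >>> 6 &&& 1 < 2 := by rw [Nat.and_one_is_mod]; exact Nat.mod_lt _ (by norm_num)
    rcases (by omega : n >>> 6 &&& 1 = 0 ∨ n >>> 6 &&& 1 = 1) with h | h <;> rw [h]
    · simp [pv_zero_bor]
    · norm_num
      have hchain : PySem.Int.bor ((1:Int) <<< (7:Nat)) (↑n) = PySem.Int.bor (↑n) 128 := by
        rw [show ((1:Int) <<< (7:Nat)) = (((128:Nat)):Int) from by decide]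
        rw [show ((128:Int)) = (((128:Nat)):Int) from by decide]
        simp only [PySem.Int.bor_natCast, Nat.cast_inj]
        simp [Nat.lor_comm]
      rw [hchain]
  · -- size_of_in_value = 8
    unfold uintX_to_intX_represented_on_8_bits uintX_to_intX_represented_on_8_bits_alt
    rw [show PySem.List.pyRange 8 8 1 = [] from by decide]
    norm_num [List.foldl, pvSetBitInValue, pvSetBit, pvGetBit, Int.toNat]
    rw [show PySem.Int.band 255 (((1:Int) <<< (8:Nat)) - 1).not = 0 from by decide]
    rw [hsb]
    have hlt : n >>> 7 &&& 1 < 2 := by rw [Nat.and_one_is_mod]; exact Nat.mod_lt _ (by norm_num)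
    rcases (by omega : n >>> 7 &&& 1 = 0 ∨ n >>> 7 &&& 1 = 1) with h | h <;> rw [h]
    · simp
    · simp

-- ===== VERDICT (by name: the statement is the Claim_ definition above) =====
theorem uintX_to_intX_represented_on_8_bits_spec : Claim_equal_uintX_to_intX_represented_on_8_bits := by
  intro in_value size_of_in_value _ hpre
  unfold Spec_uintX_to_intX_represented_on_8_bits
  by_cases hg : 0 < size_of_in_value ∧ size_of_in_value ≤ 8
  · obtain ⟨hv0, _⟩ := hpre hg
    rw [show in_value = ((in_value.toNat : Nat) : Int) from by omega]
    exact pv_key in_value.toNat size_of_in_value hg.1 hg.2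
  · unfold uintX_to_intX_represented_on_8_bits uintX_to_intX_represented_on_8_bits_alt
    rw [if_neg (by omega), if_pos hg]
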